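-- pv_equiv track=rewrite | github.com/jrmanrique/codingproblems | projecteuler/python/p047.py | isdistinct
-- ===== SOURCE A (Python) =====
-- from math import sqrt
--
-- def get_prime_factors(num):
--     def get_next_prime(num):
--         for div in range(2, int(sqrt(num)) + 1):
--             if num % div == 0:
--                 num = num // div
--                 return num, div
--         return 1, num
--
--     factors = []
--     while num != 1:
--         num, factor = get_next_prime(num)
--         factors.append(factor)
--     return factors
--
-- def isdistinct(seq, length):
--     def _isdistinct(a, b, length):
--         x = set(get_prime_factors(a))
--         y = set(get_prime_factors(b))
--         if not x & y and len(x) == len(y) == length: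
--             return True
--         return False
--
--     return all([_isdistinct(*seq[i:i + 2], length) for i in range(len(seq) - 1)])
-- ===== SOURCE B (Python) =====
-- def isdistinct(seq, length):
--     def distinct_prime_factors(n):
--         primes = set()
--         p = 2
--         while p * p <= n:
--             if n % p == 0:
--                 primes.add(p)
--                 while n % p == 0:
--                     n //= p
--             p += 1
--         if n != 1:
--             primes.add(n)
--         return primes
--
--     prev = None
--     for x in seq:
--         cur = distinct_prime_factors(x)
--         if prev is not None:
--             if len(prev) != length or len(cur) != length or (prev & cur):
--                 return False
--         prev = cur
--     return True
-- ===== Notes on version B (the rewrite author's own statement) =====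
-- stated objective: faster
-- what changed: B replaces A's factorizer (which restarts trial division from 2 and recomputes int(sqrt) for every extracted factor, building a multiset later collapsed by set()) with a single increasing sweep that divides each found prime out completely, collecting the distinct primes directly, and replaces A's pairwise slice comprehension over indices (factorizing every element twice) with one streaming pass carrying the previous factor set and returning False early.
import Mathlib
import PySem

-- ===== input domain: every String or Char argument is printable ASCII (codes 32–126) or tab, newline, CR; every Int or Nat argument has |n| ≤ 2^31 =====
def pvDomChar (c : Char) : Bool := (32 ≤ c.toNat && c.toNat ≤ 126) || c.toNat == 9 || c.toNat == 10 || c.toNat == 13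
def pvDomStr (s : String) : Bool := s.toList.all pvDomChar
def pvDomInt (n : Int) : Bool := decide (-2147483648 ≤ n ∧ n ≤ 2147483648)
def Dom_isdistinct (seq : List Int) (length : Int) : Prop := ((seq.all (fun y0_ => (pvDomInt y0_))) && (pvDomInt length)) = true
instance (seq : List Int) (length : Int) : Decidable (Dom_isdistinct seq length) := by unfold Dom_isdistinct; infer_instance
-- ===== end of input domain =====

-- B factors each element by a single increasing sweep that divides out each prime completely
-- (instead of A's restart-from-2-per-factor trial division) and checks the pairs in one
-- streaming pass with early exit; return-value equivalence is proved on nonnegative inputs.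


-- ===== PORT A =====
-- int(sqrt(num)): exact integer square root on the admitted domain (0 ≤ num ≤ 2^31, where float sqrt rounds correctly)
def pvIntSqrt (num : Int) : Int := Int.ofNat (Nat.sqrt num.toNat)

-- get_next_prime: first div in range(2, int(sqrt(num))+1) dividing num
def getNextPrime (num : Int) : Int × Int :=
  match (PySem.List.pyRange 2 (pvIntSqrt num + 1) 1).find? (fun d => PySem.Int.mod num d == 0) with
  | some d => (PySem.Int.floordiv num d, d)
  | none => (1, num)

-- the 'while num != 1' loop; fuel num.toNat+1 suffices (num strictly shrinks, or becomes 1)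
def gpfLoop : Nat → Int → List Int → List Int
  | 0, _, factors => factors
  | fuel+1, num, factors =>
    if num == 1 then factors
    else
      let nf := getNextPrime num
      gpfLoop fuel nf.1 (factors ++ [nf.2])

def getPrimeFactors (num : Int) : List Int := gpfLoop (num.toNat + 1) num []

-- _isdistinct(a, b, length)
def pairCheck (a b length : Int) : Bool :=
  let x : PySem.Set Int := PySem.Set.ofList (getPrimeFactors a)
  let y : PySem.Set Int := PySem.Set.ofList (getPrimeFactors b)
  if (PySem.Set.inter x y).isEmpty && ((PySem.Set.len x == PySem.Set.len y) && (PySem.Set.len y == length)) then true else false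

def isdistinct (seq : List Int) (length : Int) : Bool :=
  ((PySem.List.pyRange 0 ((seq.length : Int) - 1) 1).map (fun i =>
      match PySem.List.slice seq (some i) (some (i + 2)) with
      | [a, b] => pairCheck a b length
      | _ => false)).all id

-- ===== PORT B =====
-- inner 'while n % p == 0: n //= p' of B's factorizer
def dpfInner : Nat → Int → Int → Int
  | 0, n, _ => n
  | fuel+1, n, p =>
    if PySem.Int.mod n p == 0 then dpfInner fuel (PySem.Int.floordiv n p) p else n

-- outer 'while p * p <= n: … p += 1' sweep; returns (collected primes, leftover n)
def dpfOuter : Nat → Int → Int → PySem.Set Int → PySem.Set Int × Int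
  | 0, _, n, primes => (primes, n)
  | fuel+1, p, n, primes =>
    if p * p ≤ n then
      if PySem.Int.mod n p == 0 then
        dpfOuter fuel (p + 1) (dpfInner (n.toNat + 1) n p) (PySem.Set.add primes p)
      else dpfOuter fuel (p + 1) n primes
    else (primes, n)

-- final 'if n != 1: primes.add(n)'
def pvFinish (r : PySem.Set Int × Int) : PySem.Set Int :=
  if r.2 == 1 then r.1 else PySem.Set.add r.1 r.2

def distinctPrimes (n : Int) : PySem.Set Int :=
  pvFinish (dpfOuter (n.toNat + 2) 2 n PySem.Set.empty)

-- the streaming pass carrying the previous element's factor set ('prev'); false = early return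
def altLoop (length : Int) : Option (PySem.Set Int) → List Int → Bool
  | _, [] => true
  | prev, x :: rest =>
    let cur := distinctPrimes x
    match prev with
    | none => altLoop length (some cur) rest
    | some pv =>
      if !(PySem.Set.len pv == length) || !(PySem.Set.len cur == length) || !(PySem.Set.inter pv cur).isEmpty then false
      else altLoop length (some cur) rest

def isdistinct_alt (seq : List Int) (length : Int) : Bool := altLoop length none seq

-- ===== PRECONDITION & SPEC =====
-- Pre_ excludes exactly the inputs where Python A raises: with at least two elements, a negative
-- element reaches math.sqrt, which raises ValueError.
def Pre_isdistinct (seq : List Int) (_length : Int) : Prop :=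
  seq.length ≤ 1 ∨ ∀ x ∈ seq, 0 ≤ x
instance (seq : List Int) (length : Int) : Decidable (Pre_isdistinct seq length) := by unfold Pre_isdistinct; infer_instance

def pvWitness_isdistinct : List Int × Int := ([6, 35], 2)

def Spec_isdistinct (seq : List Int) (length : Int) (out : Bool) : Prop := out = isdistinct_alt seq length
instance (seq : List Int) (length : Int) (out : Bool) : Decidable (Spec_isdistinct seq length out) := by unfold Spec_isdistinct; infer_instance

-- ===== CLAIM (what is proved, stated in full; the proofs are below) =====
def Claim_equal_isdistinct : Prop := ∀ (seq : List Int) (length : Int), Dom_isdistinct seq length → Pre_isdistinct seq length → Spec_isdistinct seq length (isdistinct seq length)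


-- ===== LEMMAS AND PROOFS =====

-- reference structural form of A's pairwise pass
def chkA (L : Int) : List Int → Bool
  | a :: b :: r => pairCheck a b L && chkA L (b :: r)
  | _ => true

-- seq[i:i+2] for a Nat index is take 2 ∘ drop i
theorem slice_two (m : List Int) (j : Nat) :
    PySem.List.slice m (some (j : Int)) (some ((j : Int) + 2)) = (m.drop j).take 2 := by
  have h := PySem.List.slice_natCast m j (j + 2)
  have e : ((j : Int) + 2) = ((j + 2 : Nat) : Int) := by push_cast; ring
  rw [e, h]
  simp

-- A's range/slice comprehension equals the structural recursion chkA
theorem range_eq_chkA (L : Int) (l : List Int) :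
    ((List.range (l.length - 1)).map (fun k =>
      match (l.drop k).take 2 with
      | [a, b] => pairCheck a b L
      | _ => false)).all id = chkA L l := by
  match l with
  | [] => rfl
  | [a] => rfl
  | a :: b :: r =>
    have ih := range_eq_chkA L (b :: r)
    have hlen : (a :: b :: r).length - 1 = ((b :: r).length - 1) + 1 := by simp
    rw [hlen, List.range_succ_eq_map, List.map_cons, List.all_cons, List.map_map]
    have hcomp : ((fun k => match ((a :: b :: r).drop k).take 2 with
          | [x, y] => pairCheck x y L
          | _ => false) ∘ Nat.succ)
        = (fun k => match ((b :: r).drop k).take 2 with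
          | [x, y] => pairCheck x y L
          | _ => false) := by
      funext k; rfl
    rw [hcomp, ih]
    simp [chkA]

theorem isdistinct_eq_chkA (seq : List Int) (L : Int) :
    isdistinct seq L = chkA L seq := by
  cases seq with
  | nil => rfl
  | cons h t =>
    unfold isdistinct
    have hc : (((h :: t).length : Int) - 1) = ((t.length : Nat) : Int) := by
      push_cast [List.length_cons]; ring
    rw [hc, PySem.List.pyRange_zero_natCast, List.map_map]
    have hfun : ((fun i => match PySem.List.slice (h :: t) (some i) (some (i + 2)) with
          | [a, b] => pairCheck a b L
          | _ => false) ∘ fun k : Nat => (k : Int))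
        = (fun k : Nat => match ((h :: t).drop k).take 2 with
          | [a, b] => pairCheck a b L
          | _ => false) := by
      funext k
      simp only [Function.comp_apply, slice_two]
    rw [hfun]
    have h2 := range_eq_chkA L (h :: t)
    simpa using h2

-- chained comparison len(x) == len(y) == L splits into two comparisons with L
theorem lenChain (x y L : Int) : ((x == y) && (y == L)) = ((x == L) && (y == L)) := by
  by_cases h : y = L
  · subst h; simp
  · have hy : (y == L) = false := beq_eq_false_iff_ne.mpr h
    simp [hy]

-- ---------- find? over an integer range ----------

theorem find?_pyRange_none (p : Int → Bool) (a b : Int)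
    (h : ∀ x, a ≤ x → x < b → p x = false) :
    (PySem.List.pyRange a b 1).find? p = none := by
  rw [List.find?_eq_none]
  intro x hx
  rw [PySem.List.mem_pyRange_one] at hx
  simp [h x hx.1 hx.2]

theorem find?_pyRange_some (p : Int → Bool) (a b c : Int)
    (hac : a ≤ c) (hcb : c < b) (hc : p c = true)
    (hmin : ∀ x, a ≤ x → x < c → p x = false) :
    (PySem.List.pyRange a b 1).find? p = some c := by
  have key : ∀ (k : Nat) (a : Int), a ≤ c → (c - a).toNat = k →
      (∀ x, a ≤ x → x < c → p x = false) → (PySem.List.pyRange a b 1).find? p = some c := by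
    intro k
    induction k with
    | zero =>
      intro a hac h0 _
      have hea : a = c := by omega
      subst hea
      rw [PySem.List.pyRange_one_cons (by omega)]
      simp [List.find?_cons_of_pos, hc]
    | succ k ih =>
      intro a hac h0 hmin
      have hlt : a < c := by omega
      rw [PySem.List.pyRange_one_cons (by omega)]
      rw [List.find?_cons_of_neg (by simp [hmin a le_rfl hlt])]
      exact ih (a + 1) (by omega) (by omega) (fun x hx1 hx2 => hmin x (by omega) hx2)
  exact key (c - a).toNat a hac rfl hmin

-- ---------- generic Int prime facts ----------

theorem int_exists_prime_dvd (n : Int) (h : 2 ≤ n) :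
    ∃ q : Int, Prime q ∧ 0 < q ∧ q ∣ n := by
  obtain ⟨p, hp, hdvd⟩ := Nat.exists_prime_and_dvd (n := n.toNat) (by omega)
  refine ⟨(p : Int), Nat.prime_iff_prime_int.mp hp, by exact_mod_cast hp.pos, ?_⟩
  have : (p : Int) ∣ (n.toNat : Int) := Int.natCast_dvd_natCast.mpr hdvd
  rwa [Int.toNat_of_nonneg (by omega)] at this

theorem int_prime_eq_of_dvd (q p : Int) (hq : Prime q) (hp : Prime p)
    (hq0 : 0 < q) (hp0 : 0 < p) (hdvd : q ∣ p) : q = p := by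
  have hqn : q.natAbs.Prime := Int.prime_iff_natAbs_prime.mp hq
  have hpn : p.natAbs.Prime := Int.prime_iff_natAbs_prime.mp hp
  have hd : q.natAbs ∣ p.natAbs := Int.natAbs_dvd_natAbs.mpr hdvd
  have := (Nat.prime_dvd_prime_iff_eq hqn hpn).mp hd
  omega

-- ---------- A-side characterisation ----------

theorem int_prime_iff (p : Int) (h0 : 0 ≤ p) : Prime p ↔ p.toNat.Prime := by
  rw [Int.prime_iff_natAbs_prime]
  have : p.natAbs = p.toNat := by omega
  rw [this]

theorem getNextPrime_eq (n : Int) (h : 2 ≤ n) :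
    getNextPrime n = (((n.toNat / n.toNat.minFac : Nat) : Int), ((n.toNat.minFac : Nat) : Int)) := by
  have hn : n = (n.toNat : Int) := by omega
  have hm2 : 2 ≤ n.toNat := by omega
  by_cases hp : n.toNat.Prime
  · -- prime: no divisor in [2, sqrt+1); find? = none, and minFac = n
    have hmf : n.toNat.minFac = n.toNat := hp.minFac_eq
    have hfind : (PySem.List.pyRange 2 (pvIntSqrt n + 1) 1).find?
        (fun d => PySem.Int.mod n d == 0) = none := by
      apply find?_pyRange_none
      intro x hx1 hx2
      by_contra hcon
      have hmod : PySem.Int.mod n x = 0 := by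
        cases hmod : PySem.Int.mod n x == 0
        · simp [hmod] at hcon
        · exact by simpa using hmod
      have hdvd : x ∣ n := (PySem.Int.mod_eq_zero_iff_dvd n x).mp hmod
      have hxd : x.toNat ∣ n.toNat := by
        have : (x.toNat : Int) ∣ (n.toNat : Int) := by
          rw [Int.toNat_of_nonneg (by omega : (0:Int) ≤ x), ← hn]; exact hdvd
        exact_mod_cast this
      have hx2' : x.toNat ≤ Nat.sqrt n.toNat := by
        have : x < (Nat.sqrt n.toNat : Int) + 1 := hx2
        omega
      have hslt : Nat.sqrt n.toNat < n.toNat := Nat.sqrt_lt_self (by omega)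
      rcases (hp.eq_one_or_self_of_dvd _ hxd) with h1 | h1 <;> omega
    unfold getNextPrime
    rw [hfind]
    rw [hmf, Nat.div_self (by omega)]
    simp [← hn]
  · -- composite: find? hits minFac
    have hkp : n.toNat.minFac.Prime := Nat.minFac_prime (by omega)
    have hk2 : 2 ≤ n.toNat.minFac := hkp.two_le
    have hkdvd : n.toNat.minFac ∣ n.toNat := Nat.minFac_dvd _
    have hksq : n.toNat.minFac * n.toNat.minFac ≤ n.toNat := by
      have := Nat.minFac_sq_le_self (by omega : 0 < n.toNat) hp
      nlinarith [this, sq_nonneg n.toNat.minFac]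
    have hkle : n.toNat.minFac ≤ Nat.sqrt n.toNat := Nat.le_sqrt.mpr hksq
    have hfind : (PySem.List.pyRange 2 (pvIntSqrt n + 1) 1).find?
        (fun d => PySem.Int.mod n d == 0) = some ((n.toNat.minFac : Nat) : Int) := by
      apply find?_pyRange_some
      · exact_mod_cast hk2
      · show ((n.toNat.minFac : Nat) : Int) < pvIntSqrt n + 1
        unfold pvIntSqrt
        rw [Int.ofNat_eq_natCast]
        have h' : n.toNat.minFac < n.toNat.sqrt + 1 := by omega
        exact_mod_cast h'
      · have : ((n.toNat.minFac : Nat) : Int) ∣ n := by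
          rw [hn]; exact_mod_cast hkdvd
        simp [(PySem.Int.mod_eq_zero_iff_dvd n _).mpr this]
      · intro x hx1 hx2
        by_contra hcon
        have hmod : PySem.Int.mod n x = 0 := by
          cases hmod : PySem.Int.mod n x == 0
          · simp [hmod] at hcon
          · exact by simpa using hmod
        have hdvd : x ∣ n := (PySem.Int.mod_eq_zero_iff_dvd n x).mp hmod
        have hxd : x.toNat ∣ n.toNat := by
          have : (x.toNat : Int) ∣ (n.toNat : Int) := by
            rw [Int.toNat_of_nonneg (by omega : (0:Int) ≤ x), ← hn]; exact hdvd
          exact_mod_cast this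
        have := Nat.minFac_le_of_dvd (by omega) hxd
        omega
    have hfl : PySem.Int.floordiv n ((n.toNat.minFac : Nat) : Int) = ((n.toNat / n.toNat.minFac : Nat) : Int) := by
      rw [hn]; exact PySem.Int.floordiv_natCast _ _
    unfold getNextPrime
    rw [hfind]
    dsimp only
    rw [hfl]

theorem gpf_eq (fuel : Nat) : ∀ (n : Int) (acc : List Int), 1 ≤ n → n.toNat ≤ fuel →
    gpfLoop fuel n acc = acc ++ (n.toNat.primeFactorsList).map (fun q : Nat => (q : Int)) := by
  induction fuel with
  | zero => intro n acc h1 h2; omega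
  | succ fuel ih =>
    intro n acc h1 h2
    by_cases he : n = 1
    · subst he
      simp [gpfLoop, Nat.primeFactorsList_one]
    · have h2n : 2 ≤ n := by omega
      have hstep : gpfLoop (fuel + 1) n acc
          = if (n == 1) = true then acc
            else gpfLoop fuel (getNextPrime n).1 (acc ++ [(getNextPrime n).2]) := rfl
      rw [hstep, if_neg (by simpa using he), getNextPrime_eq n h2n]

      have hkp : n.toNat.minFac.Prime := Nat.minFac_prime (by omega)
      have hk2 : 2 ≤ n.toNat.minFac := hkp.two_le
      have hkdvd : n.toNat.minFac ∣ n.toNat := Nat.minFac_dvd _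
      have hq1 : 1 ≤ n.toNat / n.toNat.minFac :=
        (Nat.one_le_div_iff (by omega)).mpr (Nat.le_of_dvd (by omega) hkdvd)
      have hqlt : n.toNat / n.toNat.minFac < n.toNat := Nat.div_lt_self (by omega) (by omega)
      have hrec := ih ((n.toNat / n.toNat.minFac : Nat) : Int) (acc ++ [((n.toNat.minFac : Nat) : Int)])
        (by exact_mod_cast hq1) (by omega)
      rw [Int.toNat_natCast] at hrec
      rw [hrec]
      obtain ⟨t, ht⟩ : ∃ t, n.toNat = t + 2 := ⟨n.toNat - 2, by omega⟩
      rw [ht, Nat.primeFactorsList_add_two, ← ht]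
      simp [List.append_assoc]

theorem mem_getPrimeFactors (n : Int) (h : 1 ≤ n) (x : Int) :
    x ∈ getPrimeFactors n ↔ Prime x ∧ 0 < x ∧ x ∣ n := by
  unfold getPrimeFactors
  rw [gpf_eq (n.toNat + 1) n [] h (by omega), List.nil_append]
  constructor
  · intro hx
    obtain ⟨q, hq, rfl⟩ := List.mem_map.mp hx
    have hq' := (Nat.mem_primeFactorsList (by omega : n.toNat ≠ 0)).mp hq
    refine ⟨Nat.prime_iff_prime_int.mp hq'.1, by exact_mod_cast hq'.1.pos, ?_⟩
    have : (q : Int) ∣ (n.toNat : Int) := Int.natCast_dvd_natCast.mpr hq'.2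
    rwa [Int.toNat_of_nonneg (by omega)] at this
  · rintro ⟨hxp, hx0, hxd⟩
    apply List.mem_map.mpr
    have hd : x.toNat ∣ n.toNat := by
      have : (x.toNat : Int) ∣ (n.toNat : Int) := by
        rw [Int.toNat_of_nonneg (by omega : (0:Int) ≤ x), Int.toNat_of_nonneg (by omega : (0:Int) ≤ n)]
        exact hxd
      exact_mod_cast this
    exact ⟨x.toNat, (Nat.mem_primeFactorsList (by omega : n.toNat ≠ 0)).mpr
      ⟨(int_prime_iff x (by omega)).mp hxp, hd⟩, by omega⟩

-- ---------- B-side characterisation ----------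

theorem dpfInner_spec (fuel : Nat) : ∀ (n p : Int), 1 ≤ n → 2 ≤ p → Prime p → n.toNat ≤ fuel →
    1 ≤ dpfInner fuel n p ∧ dpfInner fuel n p ∣ n ∧ ¬ (p ∣ dpfInner fuel n p) ∧
      (∀ q : Int, Prime q → 0 < q → q ≠ p → (q ∣ dpfInner fuel n p ↔ q ∣ n)) := by
  induction fuel with
  | zero => intro n p h1 _ _ hf; omega
  | succ fuel ih =>
    intro n p h1 h2 hp hf
    by_cases hdvd : p ∣ n
    · have hmod : (PySem.Int.mod n p == 0) = true := by
        simp [(PySem.Int.mod_eq_zero_iff_dvd n p).mpr hdvd]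
      have hstep : dpfInner (fuel + 1) n p
          = if (PySem.Int.mod n p == 0) = true then dpfInner fuel (PySem.Int.floordiv n p) p else n := rfl
      rw [if_pos hmod] at hstep
      have hfd : PySem.Int.floordiv n p = n / p := PySem.Int.floordiv_eq_ediv_of_pos (by omega)
      have hmul : n / p * p = n := Int.ediv_mul_cancel hdvd
      have hm1 : 1 ≤ n / p := by nlinarith [hmul]
      have hmn : n / p ∣ n := ⟨p, hmul.symm⟩
      have hmlt : n / p < n := by nlinarith [hmul]
      have hrec := ih (n / p) p hm1 h2 hp (by omega)
      rw [hstep, hfd]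
      refine ⟨hrec.1, hrec.2.1.trans hmn, hrec.2.2.1, ?_⟩
      intro q hq hq0 hqp
      rw [hrec.2.2.2 q hq hq0 hqp]
      constructor
      · exact fun hx => hx.trans hmn
      · intro hqn
        have : q ∣ (n / p) * p := by rw [hmul]; exact hqn
        rcases hq.dvd_mul.mp (by rwa [mul_comm] at this) with hqq | hqq
        · exact absurd (int_prime_eq_of_dvd q p hq hp hq0 (by omega) hqq) hqp
        · exact hqq
    · have hmod : (PySem.Int.mod n p == 0) = false := by
        cases hmodb : PySem.Int.mod n p == 0
        · rfl
        · exact absurd ((PySem.Int.mod_eq_zero_iff_dvd n p).mp (by simpa using hmodb)) hdvd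
      have hstep : dpfInner (fuel + 1) n p
          = if (PySem.Int.mod n p == 0) = true then dpfInner fuel (PySem.Int.floordiv n p) p else n := rfl
      rw [if_neg (by simp [hmod])] at hstep
      rw [hstep]
      exact ⟨h1, dvd_rfl, hdvd, fun q _ _ _ => Iff.rfl⟩

theorem finish_base (p n : Int) (primes : PySem.Set Int)
    (h1 : 1 ≤ n) (h2 : 2 ≤ p) (hge : ∀ q : Int, Prime q → 0 < q → q ∣ n → p ≤ q)
    (hlt : n < p * p) (hnd : primes.Nodup) :
    (pvFinish (primes, n)).Nodup ∧
      ∀ x, x ∈ pvFinish (primes, n) ↔ x ∈ primes ∨ (Prime x ∧ 0 < x ∧ x ∣ n) := by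
  by_cases he : n = 1
  · subst he
    have hfin : pvFinish (primes, (1:Int)) = primes := by simp [pvFinish]
    rw [hfin]
    refine ⟨hnd, fun x => ?_⟩
    constructor
    · exact Or.inl
    · rintro (hx | ⟨hxp, _, hxd⟩)
      · exact hx
      · exact absurd (isUnit_of_dvd_one hxd) hxp.not_unit
  · -- n ≥ 2 and every prime divisor is ≥ p with n < p*p: n itself is prime
    have h2n : 2 ≤ n := by omega
    obtain ⟨q, hq, hq0, hqd⟩ := int_exists_prime_dvd n h2n
    have hqp : p ≤ q := hge q hq hq0 hqd
    have hmul : n / q * q = n := Int.ediv_mul_cancel hqd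
    have hm1 : 1 ≤ n / q := by nlinarith [hmul]
    have hnp : Prime n := by
      by_cases hm : n / q = 1
      · rw [hm, one_mul] at hmul; rwa [← hmul]
      · exfalso
        have hm2 : 2 ≤ n / q := by omega
        obtain ⟨q', hq', hq0', hqd'⟩ := int_exists_prime_dvd (n / q) hm2
        have hq'n : q' ∣ n := hqd'.trans ⟨q, hmul.symm⟩
        have hq'p : p ≤ q' := hge q' hq' hq0' hq'n
        have hle : q' ≤ n / q := Int.le_of_dvd (by omega) hqd'
        have hmul' : q * (n / q) = n := by rw [mul_comm]; exact hmul
        have t1 : q * q' ≤ q * (n / q) := mul_le_mul_of_nonneg_left hle (by omega)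
        have t2 : p * p ≤ q * q' := mul_le_mul hqp hq'p (by omega) (by omega)
        linarith [t1, t2, hmul', hlt]
    have hfin : pvFinish (primes, n) = PySem.Set.add primes n := by
      simp [pvFinish, he]
    rw [hfin]
    refine ⟨PySem.Set.nodup_add primes n hnd, fun x => ?_⟩
    rw [PySem.Set.mem_add]
    constructor
    · rintro (hx | rfl)
      · exact Or.inl hx
      · exact Or.inr ⟨hnp, by omega, dvd_rfl⟩
    · rintro (hx | ⟨hxp, hx0, hxd⟩)
      · exact Or.inl hx
      · exact Or.inr (int_prime_eq_of_dvd x n hxp hnp hx0 (by omega) hxd)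

theorem dpfOuter_spec (fuel : Nat) : ∀ (p n : Int) (primes : PySem.Set Int),
    1 ≤ n → 2 ≤ p → (∀ q : Int, Prime q → 0 < q → q ∣ n → p ≤ q) →
    n.toNat + 2 ≤ fuel + p.toNat → primes.Nodup →
    (pvFinish (dpfOuter fuel p n primes)).Nodup ∧
      ∀ x, x ∈ pvFinish (dpfOuter fuel p n primes) ↔ x ∈ primes ∨ (Prime x ∧ 0 < x ∧ x ∣ n) := by
  induction fuel with
  | zero =>
    intro p n primes h1 h2 hge hf hnd
    have hpn : n + 2 ≤ p := by omega
    have hlt : n < p * p := by nlinarith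
    exact finish_base p n primes h1 h2 hge hlt hnd
  | succ fuel ih =>
    intro p n primes h1 h2 hge hf hnd
    by_cases hpp : p * p ≤ n
    · by_cases hdvd : p ∣ n
      · -- p divides n: p is prime, divide it out fully, recurse
        have hmod : (PySem.Int.mod n p == 0) = true := by
          simp [(PySem.Int.mod_eq_zero_iff_dvd n p).mpr hdvd]
        have hstep0 : dpfOuter (fuel + 1) p n primes
            = if p * p ≤ n then
                (if (PySem.Int.mod n p == 0) = true then
                  dpfOuter fuel (p + 1) (dpfInner (n.toNat + 1) n p) (PySem.Set.add primes p)
                else dpfOuter fuel (p + 1) n primes)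
              else (primes, n) := rfl
        have hstep : dpfOuter (fuel + 1) p n primes
            = dpfOuter fuel (p + 1) (dpfInner (n.toNat + 1) n p) (PySem.Set.add primes p) := by
          rw [hstep0, if_pos hpp, if_pos hmod]
        -- p is prime: its least prime factor divides n, so is ≥ p, but also ≤ p
        have hpprime : Prime p := by
          have hk : p.toNat.minFac.Prime := Nat.minFac_prime (by omega)
          have hkd : p.toNat.minFac ∣ p.toNat := Nat.minFac_dvd _
          have hkdi : ((p.toNat.minFac : Nat) : Int) ∣ p := by
            have : ((p.toNat.minFac : Nat) : Int) ∣ ((p.toNat : Nat) : Int) := Int.natCast_dvd_natCast.mpr hkd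
            rwa [Int.toNat_of_nonneg (by omega : (0:Int) ≤ p)] at this
          have hge' : p ≤ ((p.toNat.minFac : Nat) : Int) :=
            hge _ (Nat.prime_iff_prime_int.mp hk) (by exact_mod_cast hk.pos) (hkdi.trans hdvd)
          have hle' : p.toNat.minFac ≤ p.toNat := Nat.le_of_dvd (by omega) hkd
          have : p.toNat.minFac = p.toNat := by omega
          exact (int_prime_iff p (by omega)).mpr (this ▸ hk)
        have hinner := dpfInner_spec (n.toNat + 1) n p h1 h2 hpprime (by omega)
        set m := dpfInner (n.toNat + 1) n p with hm
        have hmle : m ≤ n := Int.le_of_dvd (by omega) hinner.2.1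
        have hrec := ih (p + 1) m (PySem.Set.add primes p) hinner.1 (by omega)
          (fun q hq hq0 hqd => by
            have hqn : q ∣ n := (hinner.2.2.2 q hq hq0 (fun hqp => hinner.2.2.1 (hqp ▸ hqd))).mp hqd
            have := hge q hq hq0 hqn
            have hne : q ≠ p := fun hqp => hinner.2.2.1 (hqp ▸ hqd)
            omega)
          (by omega) (PySem.Set.nodup_add primes p hnd)
        rw [hstep]
        refine ⟨hrec.1, fun x => ?_⟩
        rw [hrec.2 x, PySem.Set.mem_add]
        constructor
        · rintro ((hx | rfl) | ⟨hxp, hx0, hxd⟩)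
          · exact Or.inl hx
          · exact Or.inr ⟨hpprime, by omega, hdvd⟩
          · exact Or.inr ⟨hxp, hx0, hxd.trans hinner.2.1⟩
        · rintro (hx | ⟨hxp, hx0, hxd⟩)
          · exact Or.inl (Or.inl hx)
          · by_cases hxp' : x = p
            · exact Or.inl (Or.inr hxp')
            · exact Or.inr ⟨hxp, hx0, (hinner.2.2.2 x hxp hx0 hxp').mpr hxd⟩
      · -- p does not divide n
        have hmod : (PySem.Int.mod n p == 0) = false := by
          cases hmodb : PySem.Int.mod n p == 0
          · rfl
          · exact absurd ((PySem.Int.mod_eq_zero_iff_dvd n p).mp (by simpa using hmodb)) hdvd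
        have hstep0 : dpfOuter (fuel + 1) p n primes
            = if p * p ≤ n then
                (if (PySem.Int.mod n p == 0) = true then
                  dpfOuter fuel (p + 1) (dpfInner (n.toNat + 1) n p) (PySem.Set.add primes p)
                else dpfOuter fuel (p + 1) n primes)
              else (primes, n) := rfl
        have hstep : dpfOuter (fuel + 1) p n primes = dpfOuter fuel (p + 1) n primes := by
          rw [hstep0, if_pos hpp, if_neg (by simp [hmod])]
        rw [hstep]
        exact ih (p + 1) n primes h1 (by omega)
          (fun q hq hq0 hqd => by
            have := hge q hq hq0 hqd
            have hne : q ≠ p := fun hqp => hdvd (hqp ▸ hqd)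
            omega)
          (by omega) hnd
    · have hstep0 : dpfOuter (fuel + 1) p n primes
          = if p * p ≤ n then
              (if (PySem.Int.mod n p == 0) = true then
                dpfOuter fuel (p + 1) (dpfInner (n.toNat + 1) n p) (PySem.Set.add primes p)
              else dpfOuter fuel (p + 1) n primes)
            else (primes, n) := rfl
      rw [hstep0, if_neg hpp]
      exact finish_base p n primes h1 h2 hge (by omega) hnd

theorem dp_spec (n : Int) (h : 1 ≤ n) :
    (distinctPrimes n).Nodup ∧ ∀ x, x ∈ distinctPrimes n ↔ Prime x ∧ 0 < x ∧ x ∣ n := by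
  have h2 : ∀ q : Int, Prime q → 0 < q → q ∣ n → (2:Int) ≤ q := by
    intro q hq hq0 _
    have := ((int_prime_iff q (by omega)).mp hq).two_le
    omega
  have := dpfOuter_spec (n.toNat + 2) 2 n PySem.Set.empty h (by omega) h2 (by omega) List.nodup_nil
  unfold distinctPrimes
  refine ⟨this.1, fun x => ?_⟩
  rw [this.2 x]
  simp [PySem.Set.empty]

theorem distinctPrimes_zero : distinctPrimes 0 = [0] := by decide

theorem getPrimeFactors_zero : getPrimeFactors 0 = [0] := by decide

theorem distinctPrimes_nodup (n : Int) (h : 0 ≤ n) : (distinctPrimes n).Nodup := by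
  by_cases he : n = 0
  · subst he; rw [distinctPrimes_zero]; simp
  · exact (dp_spec n (by omega)).1

theorem mem_distinctPrimes (n : Int) (h : 1 ≤ n) (x : Int) :
    x ∈ distinctPrimes n ↔ Prime x ∧ 0 < x ∧ x ∣ n := (dp_spec n h).2 x

-- ---------- bridging the two factor sets ----------

theorem factorSets_same_mem (a : Int) (h : 0 ≤ a) (x : Int) :
    x ∈ PySem.Set.ofList (getPrimeFactors a) ↔ x ∈ distinctPrimes a := by
  by_cases he : a = 0
  · subst he
    rw [getPrimeFactors_zero, distinctPrimes_zero]
    rw [PySem.Set.mem_ofList]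
  · rw [PySem.Set.mem_ofList, mem_getPrimeFactors a (by omega) x, mem_distinctPrimes a (by omega) x]

theorem factorSets_len (a : Int) (h : 0 ≤ a) :
    PySem.Set.len (PySem.Set.ofList (getPrimeFactors a)) = PySem.Set.len (distinctPrimes a) := by
  have hperm : (PySem.Set.ofList (getPrimeFactors a)).Perm (distinctPrimes a) :=
    (List.perm_ext_iff_of_nodup (PySem.Set.nodup_ofList _) (distinctPrimes_nodup a h)).mpr
      (factorSets_same_mem a h)
  simp [PySem.Set.len, hperm.length_eq]

theorem factorSets_inter_empty (a b : Int) (ha : 0 ≤ a) (hb : 0 ≤ b) :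
    (PySem.Set.inter (PySem.Set.ofList (getPrimeFactors a)) (PySem.Set.ofList (getPrimeFactors b))).isEmpty
      = (PySem.Set.inter (distinctPrimes a) (distinctPrimes b)).isEmpty := by
  rw [Bool.eq_iff_iff]
  simp only [List.isEmpty_iff, List.eq_nil_iff_forall_not_mem]
  constructor <;> intro hh x hx
  · rw [PySem.Set.mem_inter] at hx
    exact hh x (by rw [PySem.Set.mem_inter, factorSets_same_mem a ha, factorSets_same_mem b hb]; exact hx)
  · rw [PySem.Set.mem_inter] at hx
    exact hh x (by rw [PySem.Set.mem_inter, ← factorSets_same_mem a ha, ← factorSets_same_mem b hb]; exact hx)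

theorem pairCheck_eq_step (a b L : Int) (ha : 0 ≤ a) (hb : 0 ≤ b) :
    pairCheck a b L =
      !(!(PySem.Set.len (distinctPrimes a) == L) || !(PySem.Set.len (distinctPrimes b) == L)
        || !(PySem.Set.inter (distinctPrimes a) (distinctPrimes b)).isEmpty) := by
  unfold pairCheck
  dsimp only
  rw [lenChain]
  rw [factorSets_len a ha, factorSets_len b hb, factorSets_inter_empty a b ha hb]
  cases hE : (PySem.Set.inter (distinctPrimes a) (distinctPrimes b)).isEmpty <;>
    cases h1 : (PySem.Set.len (distinctPrimes a) == L) <;>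
    cases h2 : (PySem.Set.len (distinctPrimes b) == L) <;>
    simp_all

theorem chk_eq_altLoop (L : Int) (l : List Int) : ∀ (a : Int), 0 ≤ a → (∀ x ∈ l, 0 ≤ x) →
    chkA L (a :: l) = altLoop L (some (distinctPrimes a)) l := by
  induction l with
  | nil => intro a _ _; rfl
  | cons b r ih =>
    intro a ha hl
    have hb : (0:Int) ≤ b := hl b (by simp)
    have hr : ∀ x ∈ r, (0:Int) ≤ x := fun x hx => hl x (by simp [hx])
    have hstep := pairCheck_eq_step a b L ha hb
    show (pairCheck a b L && chkA L (b :: r)) = _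
    rw [ih b hb hr, hstep]
    simp only [altLoop]
    cases hC : (!(PySem.Set.len (distinctPrimes a) == L) || !(PySem.Set.len (distinctPrimes b) == L)
        || !(PySem.Set.inter (distinctPrimes a) (distinctPrimes b)).isEmpty) <;> simp_all


-- ===== VERDICT (by name: the statement is the Claim_ definition above) =====
theorem isdistinct_spec : Claim_equal_isdistinct := by
  intro seq L _ hpre
  unfold Spec_isdistinct
  rw [isdistinct_eq_chkA]
  match seq, hpre with
  | [], _ => rfl
  | [a], _ => rfl
  | a :: b :: r, hpre =>
    have hnn : ∀ x ∈ a :: b :: r, (0:Int) ≤ x := by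
      rcases hpre with h1 | h2
      · simp at h1
      · exact h2
    show chkA L (a :: b :: r) = altLoop L none (a :: b :: r)
    have : altLoop L none (a :: b :: r) = altLoop L (some (distinctPrimes a)) (b :: r) := rfl
    rw [this, chk_eq_altLoop L (b :: r) a (hnn a (by simp)) (fun x hx => hnn x (by simp [hx]))]
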